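-- pv_equiv track=rewrite | github.com/hitlhy715/shijunti | PredPHI/our_predphi/fe_predphi_protein.py | chemicals
-- ===== SOURCE A (Python) =====
-- from collections import Counter
--
-- Chemi_stats = {'A':{'C': 3, 'H': 7, 'O': 2, 'N': 1, 'S': 0},
--                    'C':{'C': 3, 'H': 7, 'O': 2, 'N': 1, 'S': 1},
--                    'D':{'C': 4, 'H': 7, 'O': 4, 'N': 1, 'S': 0},
--                    'E':{'C': 5, 'H': 9, 'O': 4, 'N': 1, 'S': 0},
--                    'F':{'C': 9, 'H': 11,'O': 2, 'N': 1, 'S': 0},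
--                    'G':{'C': 2, 'H': 5, 'O': 2, 'N': 1, 'S': 0},
--                    'H':{'C': 6, 'H': 9, 'O': 2, 'N': 3, 'S': 0},
--                    'I':{'C': 6, 'H': 13,'O': 2, 'N': 1, 'S': 0},
--                    'K':{'C': 6, 'H': 14,'O': 2, 'N': 2, 'S': 0},
--                    'L':{'C': 6, 'H': 13,'O': 2, 'N': 1, 'S': 0},
--                    'M':{'C': 5, 'H': 11,'O': 2, 'N': 1, 'S': 1},
--                    'N':{'C': 4, 'H': 8, 'O': 3, 'N': 2, 'S': 0},
--                    'P':{'C': 5, 'H': 9, 'O': 2, 'N': 1, 'S': 0},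
--                    'Q':{'C': 5, 'H': 10,'O': 3, 'N': 2, 'S': 0},
--                    'R':{'C': 6, 'H': 14,'O': 2, 'N': 4, 'S': 0},
--                    'S':{'C': 3, 'H': 7, 'O': 3, 'N': 1, 'S': 0},
--                    'T':{'C': 4, 'H': 9, 'O': 3, 'N': 1, 'S': 0},
--                    'V':{'C': 5, 'H': 11,'O': 2, 'N': 1, 'S': 0},
--                    'W':{'C': 11,'H': 12,'O': 2, 'N': 2, 'S': 0},
--                    'Y':{'C': 9, 'H': 11,'O': 3, 'N': 1, 'S': 0}
--                 }
--
-- def chemicals(seqs):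
--     seq_new=seqs.replace('X','').replace('U','').replace('B','').replace('Z','')
--     CE = 'CHONS'
--     count = Counter(seq_new)
--     code = []
--
--     for c in CE:
--         abundance_c = 0
--         for key in count:
--             num_c = Chemi_stats[key][c]
--             abundance_c += num_c * count[key]
--         code.append(abundance_c)
--     return(code)
-- ===== SOURCE B (Python) =====
-- # Single pass with parallel per-element count lists indexed by AA.index(ch):
-- # no Counter, no per-element scan over a count table, no intermediate strings.
-- AA = "ACDEFGHIKLMNPQRSTVWY"
-- C_ = [3, 3, 4, 5, 9, 2, 6, 6, 6, 6, 5, 4, 5, 5, 6, 3, 4, 5, 11, 9]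
-- H_ = [7, 7, 7, 9, 11, 5, 9, 13, 14, 13, 11, 8, 9, 10, 14, 7, 9, 11, 12, 11]
-- O_ = [2, 2, 4, 4, 2, 2, 2, 2, 2, 2, 2, 3, 2, 3, 2, 3, 3, 2, 2, 3]
-- N_ = [1, 1, 1, 1, 1, 1, 3, 1, 2, 1, 1, 2, 1, 2, 4, 1, 1, 1, 2, 1]
-- S_ = [0, 1, 0, 0, 0, 0, 0, 0, 0, 0, 1, 0, 0, 0, 0, 0, 0, 0, 0, 0]
--
-- def chemicals(seqs):
--     c = h = o = n = s = 0
--     for ch in seqs: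
--         if ch in "XUBZ":
--             continue
--         i = AA.index(ch)  # ValueError on an unknown residue (A raises KeyError there)
--         c += C_[i]
--         h += H_[i]
--         o += O_[i]
--         n += N_[i]
--         s += S_[i]
--     return [c, h, o, n, s]
-- ===== Notes on version B (the rewrite author's own statement) =====
-- stated objective: alternative
-- what changed: B drops A's replace-chain, Counter and elements-times-keys weighted-sum scan; instead it makes a single pass over the sequence, indexing parallel per-element count lists by AA.index(ch) and accumulating five scalars.
import Mathlib
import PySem

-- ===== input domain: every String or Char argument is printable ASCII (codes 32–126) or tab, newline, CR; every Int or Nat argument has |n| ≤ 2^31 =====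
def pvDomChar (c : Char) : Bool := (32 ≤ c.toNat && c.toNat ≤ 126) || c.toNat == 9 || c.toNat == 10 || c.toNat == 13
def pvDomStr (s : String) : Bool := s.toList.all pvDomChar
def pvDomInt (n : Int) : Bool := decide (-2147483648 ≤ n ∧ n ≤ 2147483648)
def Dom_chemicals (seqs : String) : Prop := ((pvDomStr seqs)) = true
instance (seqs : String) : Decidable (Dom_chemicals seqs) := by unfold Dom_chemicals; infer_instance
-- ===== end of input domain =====

-- B replaces A's replace-chain + Counter + elements×keys table scan by one pass over the raw
-- sequence with five parallel per-element count lists indexed by the residue's position in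
-- "ACDEFGHIKLMNPQRSTVWY"; same return value on every input A accepts (Pre_ excludes KeyError).

-- ===== PORT A =====
-- the module constant Chemi_stats, row as (C,H,O,N,S); none = KeyError (excluded by Pre_)
def chemiStats (k : Char) : Option (Int × Int × Int × Int × Int) :=
  match k with
  | 'A' => some (3, 7, 2, 1, 0)
  | 'C' => some (3, 7, 2, 1, 1)
  | 'D' => some (4, 7, 4, 1, 0)
  | 'E' => some (5, 9, 4, 1, 0)
  | 'F' => some (9, 11, 2, 1, 0)
  | 'G' => some (2, 5, 2, 1, 0)
  | 'H' => some (6, 9, 2, 3, 0)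
  | 'I' => some (6, 13, 2, 1, 0)
  | 'K' => some (6, 14, 2, 2, 0)
  | 'L' => some (6, 13, 2, 1, 0)
  | 'M' => some (5, 11, 2, 1, 1)
  | 'N' => some (4, 8, 3, 2, 0)
  | 'P' => some (5, 9, 2, 1, 0)
  | 'Q' => some (5, 10, 3, 2, 0)
  | 'R' => some (6, 14, 2, 4, 0)
  | 'S' => some (3, 7, 3, 1, 0)
  | 'T' => some (4, 9, 3, 1, 0)
  | 'V' => some (5, 11, 2, 1, 0)
  | 'W' => some (11, 12, 2, 2, 0)
  | 'Y' => some (9, 11, 3, 1, 0)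
  | _   => none

-- Chemi_stats[key][c] : inner-dict lookup; c is always one of 'CHONS' in A's loop
def chemiSel (c : Char) (r : Int × Int × Int × Int × Int) : Int :=
  match c with
  | 'C' => r.1
  | 'H' => r.2.1
  | 'O' => r.2.2.1
  | 'N' => r.2.2.2.1
  | 'S' => r.2.2.2.2
  | _ => 0

def chemicals (seqs : String) : List Int :=
  let seq_new := PySem.Str.replace (PySem.Str.replace (PySem.Str.replace
      (PySem.Str.replace seqs "X" "") "U" "") "B" "") "Z" ""
  let count := PySem.Dict.counter seq_new.toList
  List.foldl (fun code c =>
      let abundance_c : Int := List.foldl (fun ab key =>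
          let num_c : Int := match chemiStats key with
            | some r => chemiSel c r
            | none => 0      -- Python raises KeyError here; excluded by Pre_
          ab + num_c * count.getD key 0) 0 count.keys
      code ++ [abundance_c]) [] "CHONS".toList

-- ===== PORT B =====
-- the module constants of Source B: the residue alphabet and five parallel count lists
def aaStr : String := "ACDEFGHIKLMNPQRSTVWY"
def cCounts : List Int := [3, 3, 4, 5, 9, 2, 6, 6, 6, 6, 5, 4, 5, 5, 6, 3, 4, 5, 11, 9]
def hCounts : List Int := [7, 7, 7, 9, 11, 5, 9, 13, 14, 13, 11, 8, 9, 10, 14, 7, 9, 11, 12, 11]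
def oCounts : List Int := [2, 2, 4, 4, 2, 2, 2, 2, 2, 2, 2, 3, 2, 3, 2, 3, 3, 2, 2, 3]
def nCounts : List Int := [1, 1, 1, 1, 1, 1, 3, 1, 2, 1, 1, 2, 1, 2, 4, 1, 1, 1, 2, 1]
def sCounts : List Int := [0, 1, 0, 0, 0, 0, 0, 0, 0, 0, 1, 0, 0, 0, 0, 0, 0, 0, 0, 0]

def chemicals_alt (seqs : String) : List Int :=
  let t := seqs.toList.foldl (fun (a : Int × Int × Int × Int × Int) ch =>
      if "XUBZ".toList.contains ch then a
      else
        -- AA.index(ch): Python raises ValueError when ch is absent (excluded by Pre_);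
        -- there idxOf returns the length and the getD lookups below default to 0
        let i := aaStr.toList.idxOf ch
        (a.1 + cCounts.getD i 0, a.2.1 + hCounts.getD i 0, a.2.2.1 + oCounts.getD i 0,
         a.2.2.2.1 + nCounts.getD i 0, a.2.2.2.2 + sCounts.getD i 0))
    (0, 0, 0, 0, 0)
  [t.1, t.2.1, t.2.2.1, t.2.2.2.1, t.2.2.2.2]

-- ===== PRECONDITION & SPEC =====
-- Pre_ excludes exactly the inputs on which Python A raises KeyError: any character that is
-- neither one of the 20 amino-acid codes nor one of the stripped letters X/U/B/Z.
def Pre_chemicals (seqs : String) : Prop :=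
  (seqs.toList.all (fun ch => ['A','C','D','E','F','G','H','I','K','L','M','N','P','Q','R','S','T','V','W','Y','X','U','B','Z'].contains ch)) = true
instance (seqs : String) : Decidable (Pre_chemicals seqs) := by unfold Pre_chemicals; infer_instance

def pvWitness_chemicals : String := "MKVXA"

def Spec_chemicals (seqs : String) (out : List Int) : Prop := out = chemicals_alt seqs
instance (seqs : String) (out : List Int) : Decidable (Spec_chemicals seqs out) := by unfold Spec_chemicals; infer_instance

-- ===== CLAIM (what is proved, stated in full; the proofs are below) =====
def Claim_equal_chemicals : Prop := ∀ (seqs : String), Dom_chemicals seqs → Pre_chemicals seqs → Spec_chemicals seqs (chemicals seqs)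

-- ===== LEMMAS AND PROOFS =====

theorem replace_go_single (c : Char) (fuel : Nat) (l acc : List Char)
    (h : l.length ≤ fuel) :
    PySem.Chars.replace.go [c] [] fuel l acc
      = acc.reverse ++ l.filter (fun y => !(y == c)) := by
  induction fuel generalizing l acc with
  | zero =>
    have : l = [] := List.length_eq_zero_iff.mp (Nat.le_zero.mp h)
    subst this
    simp [PySem.Chars.replace.go]
  | succ n ih =>
    cases l with
    | nil => simp [PySem.Chars.replace.go]
    | cons x t =>
      rw [PySem.Chars.replace.go]
      by_cases hx : x = c
      · subst hx
        simp only [List.isPrefixOf, BEq.rfl, Bool.and_self, if_pos]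
        rw [ih _ _ (by simpa using Nat.le_of_succ_le_succ h)]
        simp
      · have : List.isPrefixOf [c] (x :: t) = false := by
          simp [List.isPrefixOf]
          exact fun hc => absurd hc.symm hx
        rw [this]
        simp only [Bool.false_eq_true, if_false]
        rw [ih t (x :: acc) (by simpa using Nat.le_of_succ_le_succ h)]
        simp [hx]

theorem replace_single (c : Char) (l : List Char) :
    PySem.Chars.replace l [c] [] = l.filter (fun y => !(y == c)) := by
  rw [PySem.Chars.replace]
  simp only [List.isEmpty_cons, Bool.false_eq_true, if_false]
  simpa using replace_go_single c l.length l [] le_rfl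

theorem sum_map_nodup_split (s : List Char) (h : Char → Int) (x : Char) (hnd : s.Nodup) :
    (s.map h).sum
      = (if x ∈ s then h x else 0)
        + ((s.filter (fun y => !(y == x))).map h).sum := by
  induction s with
  | nil => simp
  | cons a t ih =>
    rw [List.nodup_cons] at hnd
    obtain ⟨hat, hndt⟩ := hnd
    by_cases hax : a = x
    · subst hax
      simp only [List.mem_cons, true_or, if_pos, List.filter_cons, BEq.rfl,
        Bool.not_true, List.map_cons, List.sum_cons]
      rw [ih hndt]
      simp [hat]
    · have hxa : x ≠ a := fun hh => hax hh.symm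
      have hmem : (x ∈ a :: t) = (x ∈ t) := by simp [List.mem_cons, hxa]
      have hf : (!(a == x)) = true := by simp [hax]
      rw [List.filter_cons, hf]
      simp only [if_true, List.map_cons, List.sum_cons, hmem]
      rw [ih hndt]
      ring

theorem sum_count (l : List Char) (g : Char → Int) :
    ((PySem.Set.ofList l).map (fun k => g k * (l.count k : Int))).sum
      = (l.map g).sum := by
  induction l with
  | nil => simp [PySem.Set.ofList]
  | cons x xs ih =>
    rw [PySem.Set.ofList_cons]
    simp only [PySem.Set.discard, List.map_cons, List.sum_cons]
    have hcnt : ∀ k, ((x :: xs).count k : Int)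
        = (xs.count k : Int) + (if k = x then 1 else 0) := by
      intro k
      rcases eq_or_ne k x with hk | hk
      · subst hk; simp
      · have hk2 : x ≠ k := fun hh => hk hh.symm
        simp [hk, hk2]
    have hmapeq :
        ((PySem.Set.ofList xs).filter (fun y => !(y == x))).map
            (fun k => g k * ((x :: xs).count k : Int))
        = ((PySem.Set.ofList xs).filter (fun y => !(y == x))).map
            (fun k => g k * (xs.count k : Int)) := by
      apply List.map_congr_left
      intro k hkmem
      have h2 := (List.mem_filter.mp hkmem).2
      have h3 : k ≠ x := by simpa using h2
      rw [hcnt k, if_neg h3]; ring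
    rw [hmapeq]
    have hsplit := sum_map_nodup_split (PySem.Set.ofList xs)
      (fun k => g k * (xs.count k : Int)) x (PySem.Set.nodup_ofList xs)
    rw [ih] at hsplit
    rw [hcnt x, if_pos rfl]
    by_cases hx : x ∈ xs
    · have hmem : x ∈ PySem.Set.ofList xs := (PySem.Set.mem_ofList xs x).mpr hx
      rw [if_pos hmem] at hsplit
      linarith
    · have hmem : x ∉ PySem.Set.ofList xs := fun hh => hx ((PySem.Set.mem_ofList xs x).mp hh)
      rw [if_neg hmem] at hsplit
      have hc0 : xs.count x = 0 := List.count_eq_zero.mpr hx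
      rw [hc0]
      push_cast
      linarith

-- the stripped sequence of A is one filter over the characters
def pvStrip (ch : Char) : Bool := !(ch == 'X') && !(ch == 'U') && !(ch == 'B') && !(ch == 'Z')

-- B's row: the five list lookups at the alphabet index of ch
def pvLook (ch : Char) : Int × Int × Int × Int × Int :=
  (cCounts.getD (aaStr.toList.idxOf ch) 0, hCounts.getD (aaStr.toList.idxOf ch) 0,
   oCounts.getD (aaStr.toList.idxOf ch) 0, nCounts.getD (aaStr.toList.idxOf ch) 0,
   sCounts.getD (aaStr.toList.idxOf ch) 0)

theorem bfold (l : List Char) (a : Int × Int × Int × Int × Int) :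
    l.foldl (fun (a : Int × Int × Int × Int × Int) ch =>
      if "XUBZ".toList.contains ch then a
      else
        let i := aaStr.toList.idxOf ch
        (a.1 + cCounts.getD i 0, a.2.1 + hCounts.getD i 0, a.2.2.1 + oCounts.getD i 0,
         a.2.2.2.1 + nCounts.getD i 0, a.2.2.2.2 + sCounts.getD i 0)) a
    = (a.1 + ((l.filter pvStrip).map (fun k => (pvLook k).1)).sum,
       a.2.1 + ((l.filter pvStrip).map (fun k => (pvLook k).2.1)).sum,
       a.2.2.1 + ((l.filter pvStrip).map (fun k => (pvLook k).2.2.1)).sum,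
       a.2.2.2.1 + ((l.filter pvStrip).map (fun k => (pvLook k).2.2.2.1)).sum,
       a.2.2.2.2 + ((l.filter pvStrip).map (fun k => (pvLook k).2.2.2.2)).sum) := by
  induction l generalizing a with
  | nil => simp
  | cons x t ih =>
    rw [List.foldl_cons, ih, List.filter_cons]
    by_cases hx : ("XUBZ".toList.contains x) = true
    · have hs : pvStrip x = false := by
        have : x = 'X' ∨ x = 'U' ∨ x = 'B' ∨ x = 'Z' := by
          simpa [List.contains_eq_mem, show ("XUBZ" : String).toList = ['X','U','B','Z'] from rfl]
            using hx
        rcases this with h | h | h | h <;> simp [pvStrip, h]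
      rw [if_pos hx, hs]
      simp
    · have hs : pvStrip x = true := by
        have : ¬(x = 'X' ∨ x = 'U' ∨ x = 'B' ∨ x = 'Z') := by
          simpa [List.contains_eq_mem, show ("XUBZ" : String).toList = ['X','U','B','Z'] from rfl]
            using hx
        rw [not_or, not_or, not_or] at this
        simp [pvStrip, this.1, this.2.1, this.2.2.1, this.2.2.2]
      rw [if_neg hx, hs]
      simp only [if_true, List.map_cons, List.sum_cons, pvLook]
      ring_nf

theorem stripEq (l : List Char) :
    (((l.filter (fun y => !(y == 'X'))).filter (fun y => !(y == 'U'))).filter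
        (fun y => !(y == 'B'))).filter (fun y => !(y == 'Z'))
      = l.filter pvStrip := by
  rw [List.filter_filter, List.filter_filter, List.filter_filter]
  apply List.filter_congr
  intro a _
  simp only [pvStrip]
  cases hX : a == 'X' <;> cases hU : a == 'U' <;> cases hB : a == 'B' <;>
    cases hZ : a == 'Z' <;> rfl

-- A's row of Chemi_stats and B's five list lookups coincide on every character
-- (for an unknown character both sides are the all-zero row: A's match defaults to none→0
-- and B's idxOf runs off the end so every getD defaults to 0)
theorem rowEq (ch : Char) :
    (match chemiStats ch with | some r => r | none => ((0 : Int), (0 : Int), (0 : Int), (0 : Int), (0 : Int)))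
      = pvLook ch := by
  by_cases h1 : ch = 'A'
  · subst h1; decide
  by_cases h2 : ch = 'C'
  · subst h2; decide
  by_cases h3 : ch = 'D'
  · subst h3; decide
  by_cases h4 : ch = 'E'
  · subst h4; decide
  by_cases h5 : ch = 'F'
  · subst h5; decide
  by_cases h6 : ch = 'G'
  · subst h6; decide
  by_cases h7 : ch = 'H'
  · subst h7; decide
  by_cases h8 : ch = 'I'
  · subst h8; decide
  by_cases h9 : ch = 'K'
  · subst h9; decide
  by_cases h10 : ch = 'L'
  · subst h10; decide
  by_cases h11 : ch = 'M'
  · subst h11; decide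
  by_cases h12 : ch = 'N'
  · subst h12; decide
  by_cases h13 : ch = 'P'
  · subst h13; decide
  by_cases h14 : ch = 'Q'
  · subst h14; decide
  by_cases h15 : ch = 'R'
  · subst h15; decide
  by_cases h16 : ch = 'S'
  · subst h16; decide
  by_cases h17 : ch = 'T'
  · subst h17; decide
  by_cases h18 : ch = 'V'
  · subst h18; decide
  by_cases h19 : ch = 'W'
  · subst h19; decide
  by_cases h20 : ch = 'Y'
  · subst h20; decide
  have hn : chemiStats ch = none := by
    unfold chemiStats; split
    · exact absurd rfl h1
    · exact absurd rfl h2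
    · exact absurd rfl h3
    · exact absurd rfl h4
    · exact absurd rfl h5
    · exact absurd rfl h6
    · exact absurd rfl h7
    · exact absurd rfl h8
    · exact absurd rfl h9
    · exact absurd rfl h10
    · exact absurd rfl h11
    · exact absurd rfl h12
    · exact absurd rfl h13
    · exact absurd rfl h14
    · exact absurd rfl h15
    · exact absurd rfl h16
    · exact absurd rfl h17
    · exact absurd rfl h18
    · exact absurd rfl h19
    · exact absurd rfl h20
    · rfl
  have hidx : aaStr.toList.idxOf ch = 20 := by
    simp [aaStr, List.idxOf, List.findIdx, List.findIdx.go, Bool.cond_eq_ite, beq_iff_eq, Ne.symm h1, Ne.symm h2, Ne.symm h3, Ne.symm h4, Ne.symm h5, Ne.symm h6, Ne.symm h7, Ne.symm h8, Ne.symm h9, Ne.symm h10, Ne.symm h11, Ne.symm h12, Ne.symm h13, Ne.symm h14, Ne.symm h15, Ne.symm h16, Ne.symm h17, Ne.symm h18, Ne.symm h19, Ne.symm h20]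
  rw [hn]
  simp only [pvLook, hidx]
  decide

-- ===== VERDICT (by name: the statement is the Claim_ definition above) =====
theorem chemicals_spec : Claim_equal_chemicals := by
  intro seqs _ _
  unfold Spec_chemicals chemicals chemicals_alt
  rw [bfold]
  simp only [PySem.Str.toList_replace, show ("X" : String).toList = ['X'] from rfl,
    show ("U" : String).toList = ['U'] from rfl, show ("B" : String).toList = ['B'] from rfl,
    show ("Z" : String).toList = ['Z'] from rfl, show ("" : String).toList = [] from rfl]
  rw [replace_single, replace_single, replace_single, replace_single, stripEq seqs.toList]
  simp only [PySem.Dict.keys_counter, PySem.Dict.getD_counter]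
  simp only [PySem.List.foldl_add, zero_add]
  simp only [PySem.List.foldl_append_singleton_eq_map, List.nil_append]
  show List.map _ ['C', 'H', 'O', 'N', 'S'] = _
  simp only [List.map_cons, List.map_nil]
  rw [sum_count, sum_count, sum_count, sum_count, sum_count]
  have key : ∀ (c : Char) (sel : Int × Int × Int × Int × Int → Int),
      (∀ r, chemiSel c r = sel r) → sel (0, 0, 0, 0, 0) = 0 →
      (List.map (fun x => match chemiStats x with
          | some r => chemiSel c r
          | none => 0) (List.filter pvStrip seqs.toList)).sum
        = (List.map (fun k => sel (pvLook k)) (List.filter pvStrip seqs.toList)).sum := by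
    intro c sel hsel hz
    congr 1
    apply List.map_congr_left
    intro k _
    cases h : chemiStats k with
    | some r =>
      have hr : r = pvLook k := by have hh := rowEq k; rw [h] at hh; exact hh
      show chemiSel c r = sel (pvLook k)
      rw [hsel, hr]
    | none =>
      have hr : ((0 : Int), (0 : Int), (0 : Int), (0 : Int), (0 : Int)) = pvLook k := by
        have hh := rowEq k; rw [h] at hh; exact hh
      show (0 : Int) = sel (pvLook k)
      rw [← hr, hz]
  rw [key 'C' (fun r => r.1) (fun r => rfl) rfl,
    key 'H' (fun r => r.2.1) (fun r => rfl) rfl,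
    key 'O' (fun r => r.2.2.1) (fun r => rfl) rfl,
    key 'N' (fun r => r.2.2.2.1) (fun r => rfl) rfl,
    key 'S' (fun r => r.2.2.2.2) (fun r => rfl) rfl]
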